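-- pv_equiv track=rewrite | github.com/avrymi-asraf/NLP-Projects | ex2/main_.py | most_likely_baseline
-- ===== SOURCE A (Python) =====
-- from collections import Counter
-- from typing import List, Tuple, Dict, Union
--
-- UNKNOWN_WORD_TAG = "NN"
--
-- WORD_POSITION = 0
--
-- TAG_POSITION = 1
--
-- def most_likely_baseline(training_set: List[str], tagged_word):
--
--     training_set_quantities = Counter(training_set)
--     max_of_occur = 0
--     tag_prediction = UNKNOWN_WORD_TAG
--     for word in training_set:
--         if (
--             word[WORD_POSITION] == tagged_word[WORD_POSITION]
--             and training_set_quantities[word] > max_of_occur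
--         ):
--             max_of_occur = training_set_quantities[word]
--             tag_prediction = word[TAG_POSITION]
--     return tag_prediction
-- ===== SOURCE B (Python) =====
-- UNKNOWN_WORD_TAG = "NN"
--
-- WORD_POSITION = 0
--
-- TAG_POSITION = 1
--
-- def most_likely_baseline(training_set, tagged_word):
--     # distinct matching pairs, in order of first occurrence
--     candidates = list(dict.fromkeys(
--         p for p in training_set
--         if p[WORD_POSITION] == tagged_word[WORD_POSITION]))
--     if not candidates:
--         return UNKNOWN_WORD_TAG
--     # stable sort by descending occurrence count: head = most frequent,
--     # earliest first occurrence among ties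
--     ranked = sorted(candidates, key=lambda p: -training_set.count(p))
--     return ranked[0][TAG_POSITION]
-- ===== Notes on version B (the rewrite author's own statement) =====
-- stated objective: alternative
-- what changed: A counts every pair with a Counter and scans the whole list with a manual running max; B instead dedups the matching pairs in first-occurrence order, counts each candidate with list.count, stably sorts the candidates by descending count, and returns the tag of the head (stability gives A's earliest-first tie-break).
import Mathlib
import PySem

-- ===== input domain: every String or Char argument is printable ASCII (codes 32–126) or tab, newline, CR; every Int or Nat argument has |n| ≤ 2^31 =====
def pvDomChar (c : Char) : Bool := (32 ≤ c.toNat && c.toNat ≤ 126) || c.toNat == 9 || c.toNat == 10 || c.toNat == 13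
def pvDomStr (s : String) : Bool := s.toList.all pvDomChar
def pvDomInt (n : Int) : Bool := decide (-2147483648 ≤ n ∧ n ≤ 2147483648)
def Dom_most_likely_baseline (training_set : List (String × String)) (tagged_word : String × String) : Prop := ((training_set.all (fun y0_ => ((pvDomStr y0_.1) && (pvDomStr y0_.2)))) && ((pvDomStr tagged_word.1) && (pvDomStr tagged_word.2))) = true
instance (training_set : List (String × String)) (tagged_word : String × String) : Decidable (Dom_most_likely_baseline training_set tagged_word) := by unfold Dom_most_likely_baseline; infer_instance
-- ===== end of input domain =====

-- B replaces A's count-all-with-a-Counter + running-max scan of the full list by: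
-- dedup the matching pairs in first-occurrence order, count each candidate with
-- list.count, stable-sort by descending count, take the head (objective: alternative).

-- ===== PORT A =====
def most_likely_baseline (training_set : List (String × String)) (tagged_word : String × String) : String :=
  let training_set_quantities := PySem.Dict.counter training_set
  (training_set.foldl
    (fun (acc : Int × String) word =>
      if word.1 == tagged_word.1 ∧ training_set_quantities.getD word 0 > acc.1 then
        (training_set_quantities.getD word 0, word.2)
      else acc)
    ((0 : Int), "NN")).2

-- ===== PORT B =====
def most_likely_baseline_alt (training_set : List (String × String)) (tagged_word : String × String) : String :=
  let candidates := PySem.List.dedup (training_set.filter (fun p => p.1 == tagged_word.1))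
  match candidates with
  | [] => "NN"
  | _ :: _ =>
    -- ranked[0] is exact here: candidates is nonempty, so sorted candidates is nonempty
    match PySem.List.sorted candidates (fun p => -((training_set.count p : Int))) false with
    | r :: _ => r.2
    | [] => "NN"

-- ===== PRECONDITION & SPEC =====
def Spec_most_likely_baseline (training_set : List (String × String)) (tagged_word : String × String) (out : String) : Prop := out = most_likely_baseline_alt training_set tagged_word
instance (training_set : List (String × String)) (tagged_word : String × String) (out : String) : Decidable (Spec_most_likely_baseline training_set tagged_word out) := by unfold Spec_most_likely_baseline; infer_instance

-- ===== CLAIM (what is proved, stated in full; the proofs are below) =====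
def Claim_equal_most_likely_baseline : Prop := ∀ (training_set : List (String × String)) (tagged_word : String × String), Dom_most_likely_baseline training_set tagged_word → Spec_most_likely_baseline training_set tagged_word (most_likely_baseline training_set tagged_word)

-- ===== LEMMAS AND PROOFS =====

-- A's loop body on the filtered list: running (best count, best tag)
def pvStep (c : String × String → Int) (acc : Int × String) (w : String × String) : Int × String :=
  if c w > acc.1 then (c w, w.2) else acc

-- the first-maximal running selection over elements
def pvSel (c : String × String → Int) (m w : String × String) : String × String :=
  if c w > c m then w else m

-- the accumulator's count component only grows, and dominates every processed element
theorem pvStep_invariant (c : String × String → Int) :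
    ∀ (l : List (String × String)) (a : Int × String),
      a.1 ≤ (l.foldl (pvStep c) a).1 ∧ ∀ w ∈ l, c w ≤ (l.foldl (pvStep c) a).1 := by
  intro l
  induction l with
  | nil => intro a; exact ⟨le_refl _, by simp⟩
  | cons x t ih =>
    intro a
    have h := ih (pvStep c a x)
    constructor
    · refine le_trans ?_ h.1
      simp only [pvStep]; split_ifs with hc
      · exact le_of_lt hc
      · exact le_refl _
    · intro w hw
      rcases List.mem_cons.mp hw with rfl | hw
      · refine le_trans ?_ h.1
        simp only [pvStep]; split_ifs with hc
        · exact le_refl _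
        · omega
      · exact h.2 w hw

-- duplicates are no-ops: the fold over l equals the fold over its first-occurrence dedup
theorem pvFold_dedup (c : String × String → Int) (l : List (String × String)) (a : Int × String) :
    l.foldl (pvStep c) a = (PySem.List.dedup l).foldl (pvStep c) a := by
  induction l using List.reverseRecOn with
  | nil => rfl
  | append_singleton xs x ih =>
    rw [List.foldl_append, List.foldl_cons, List.foldl_nil, ih]
    rw [PySem.List.dedup_eq_ofList, PySem.List.dedup_eq_ofList,
        PySem.Set.ofList_append_singleton]
    by_cases hx : x ∈ PySem.Set.ofList xs
    · rw [PySem.Set.add, if_pos (by simpa [PySem.Set.contains] using hx)]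
      have hinv := (pvStep_invariant c (PySem.Set.ofList xs) a).2 x hx
      simp only [pvStep]
      rw [if_neg (by omega)]
    · rw [PySem.Set.add, if_neg (by simpa [PySem.Set.contains] using hx)]
      rw [List.foldl_append, List.foldl_cons, List.foldl_nil]

-- a fold whose step is guarded by a pure predicate on the element is a fold over the filtered list
theorem pvFold_filter {α β : Type} (p : α → Bool) (f : β → α → β) (Q : β → α → Prop)
    [inst : ∀ b a, Decidable (Q b a)] :
    ∀ (l : List α) (a : β),
      l.foldl (fun acc w => if p w = true ∧ Q acc w then f acc w else acc) a
        = (l.filter p).foldl (fun acc w => if Q acc w then f acc w else acc) a := by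
  intro l
  induction l with
  | nil => intro a; rfl
  | cons x t ih =>
    intro a
    by_cases hx : p x = true
    · simp only [List.foldl_cons, List.filter_cons, hx, if_pos, List.foldl_cons, true_and]
      rw [ih]
    · simp only [List.foldl_cons, List.filter_cons, hx, Bool.false_eq_true, if_false,
        false_and]
      rw [ih]

-- A's running-(count,tag) fold, started at a live candidate, selects the same element
-- as the running first-maximal selection
theorem pvFold_vs_sel (c : String × String → Int) :
    ∀ (t : List (String × String)) (k : String × String),
      (t.foldl (pvStep c) (c k, k.2)).2 = (t.foldl (pvSel c) k).2 := by
  intro t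
  induction t with
  | nil => intro k; rfl
  | cons x t ih =>
    intro k
    simp only [List.foldl_cons, pvStep, pvSel]
    by_cases h : c x > c k
    · rw [if_pos h, if_pos h]; exact ih x
    · rw [if_neg h, if_neg h]; exact ih k

-- head of an insertBy insertion into a nonempty list
theorem pvHead_insertBy {α : Type} (before : α → α → Bool) (y m : α) (rest : List α) :
    (PySem.List.insertBy before y (m :: rest)).head?
      = some (if before y m then y else m) := by
  show (if before y m = true then y :: m :: rest
        else m :: PySem.List.insertBy before y rest).head? = _
  split_ifs <;> rfl

-- invariant of the insertion-sort fold: the head of the accumulator is the running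
-- first-extremal element under `before`
theorem pvSortFold_head {α : Type} (before : α → α → Bool) :
    ∀ (t : List α) (acc : List α) (m : α), acc.head? = some m →
      ((t.foldl (fun acc x => PySem.List.insertBy before x acc) acc).head?
        = some (t.foldl (fun m y => if before y m then y else m) m)) := by
  intro t
  induction t with
  | nil => intro acc m hm; simpa using hm
  | cons y t ih =>
    intro acc m hm
    cases acc with
    | nil => simp at hm
    | cons a rest =>
      simp only [List.head?_cons, Option.some.injEq] at hm
      subst hm
      simp only [List.foldl_cons]
      exact ih _ _ (pvHead_insertBy before y a rest)

-- head of the stable sort of a nonempty list = the running first-extremal element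
theorem pvSorted_head {α κ : Type} [LinearOrder κ] (key : α → κ) (x : α) (t : List α) :
    (PySem.List.sorted (x :: t) key false).head?
      = some (t.foldl (fun m y => if key y < key m then y else m) x) := by
  rw [PySem.List.sorted_eq_foldl_insertBy, List.foldl_cons]
  have h := pvSortFold_head (fun a b => decide (key a < key b)) t
      (PySem.List.insertBy (fun a b => decide (key a < key b)) x []) x (by rfl)
  rw [h]
  congr 1
  refine PySem.List.foldl_congr_mem _ _ _ _ ?_
  intro m y _
  simp

theorem most_likely_baseline_spec_aux :
    ∀ (ts : List (String × String)) (tw : String × String),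
      most_likely_baseline ts tw = most_likely_baseline_alt ts tw := by
  intro ts tw
  unfold most_likely_baseline most_likely_baseline_alt
  simp only [PySem.Dict.getD_counter]
  rw [pvFold_filter (fun w => w.1 == tw.1)
        (fun (acc : Int × String) w => ((ts.count w : Int), w.2))
        (fun (acc : Int × String) w => (ts.count w : Int) > acc.1)]
  rw [show (fun (acc : Int × String) w =>
        if (ts.count w : Int) > acc.1 then ((ts.count w : Int), w.2) else acc)
      = pvStep (fun w => (ts.count w : Int)) from rfl]
  rw [pvFold_dedup]
  cases hd : PySem.List.dedup (ts.filter (fun p => p.1 == tw.1)) with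
  | nil => rfl
  | cons k t =>
    have hk : k ∈ ts := by
      have h1 : k ∈ PySem.List.dedup (ts.filter (fun p => p.1 == tw.1)) := by
        rw [hd]; exact List.mem_cons_self
      exact List.mem_of_mem_filter ((PySem.List.mem_dedup _ _).mp h1)
    have hpos : (0 : Int) < (ts.count k : Int) := by
      exact_mod_cast List.count_pos_iff.mpr hk
    have h0 : pvStep (fun w => (ts.count w : Int)) ((0 : Int), "NN") k
        = ((ts.count k : Int), k.2) := by
      simp only [pvStep]; rw [if_pos (by exact hpos)]
    rw [List.foldl_cons, h0, pvFold_vs_sel]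
    have hsort := pvSorted_head (fun p => -((ts.count p : Int))) k t
    cases hs : PySem.List.sorted (k :: t) (fun p => -((ts.count p : Int))) false with
    | nil => rw [hs] at hsort; simp at hsort
    | cons r rs =>
      rw [hs] at hsort
      simp only [List.head?_cons, Option.some.injEq] at hsort
      rw [hsort]
      congr 1
      refine PySem.List.foldl_congr_mem _ _ _ _ ?_
      intro m y _
      simp only [pvSel]
      congr 1
      simp only [gt_iff_lt, eq_iff_iff]
      omega

-- ===== VERDICT (by name: the statement is the Claim_ definition above) =====
theorem most_likely_baseline_spec : Claim_equal_most_likely_baseline := by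
  intro ts tw _
  exact most_likely_baseline_spec_aux ts tw
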